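-- pv_equiv track=rewrite | github.com/supachawal/JavaProgramming | GCJ2008PP/B_AlwaysTurnLeft.py | surveyMeshDimension
-- ===== SOURCE A (Python) =====
-- def surveyMeshDimension(forwardPath, backwardPath):
--     twoWayPath = forwardPath[1:-1] + 'RR' + backwardPath[1:-1]
--     i, j = 0, 0
--     di, dj = 1, 0
--     left, right, bottom = 0, 0, 0
--
--     for c in twoWayPath:
--         if c == 'W':
--             i, j = i + di, j + dj
--
--             left = min(left, j)
--             right = max(right, j)
--             bottom = max(bottom, i)
--         else:
--             if c == 'L':
--                 di, dj = -dj, di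
--             elif c == 'R':
--                 di, dj = dj, -di
--
--     return (bottom + 1, right - left + 1, j - left)
-- ===== SOURCE B (Python) =====
-- _DIRS = [(1, 0), (0, 1), (-1, 0), (0, -1)]
--
--
-- def _prefix_sums(xs):
--     out = [0]
--     for x in xs:
--         out.append(out[-1] + x)
--     return out
--
--
-- def surveyMeshDimension(forwardPath, backwardPath):
--     path = forwardPath[1:-1] + 'RR' + backwardPath[1:-1]
--     # Phase 1: track only the net rotation r; emit a unit step for each 'W'.
--     steps = []
--     r = 0
--     for c in path:
--         if c == 'L':
--             r += 1
--         elif c == 'R':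
--             r -= 1
--         elif c == 'W':
--             steps.append(_DIRS[r % 4])
--     # Phase 2: coordinate sequences as prefix sums (seeded with the start cell 0).
--     rows = _prefix_sums([di for di, _ in steps])
--     cols = _prefix_sums([dj for _, dj in steps])
--     # Phase 3: aggregate.
--     left = min(cols)
--     return (max(rows) + 1, max(cols) - left + 1, cols[-1] - left)
-- ===== Notes on version B (the rewrite author's own statement) =====
-- stated objective: alternative
-- what changed: B replaces A's single simulation loop with vector-rotated (di,dj) state and online min/max by a staged pipeline: a net-rotation counter indexing a fixed direction table to emit one unit step per 'W', then coordinate sequences as prefix sums, then min/max aggregation over those sequences.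
import Mathlib
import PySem

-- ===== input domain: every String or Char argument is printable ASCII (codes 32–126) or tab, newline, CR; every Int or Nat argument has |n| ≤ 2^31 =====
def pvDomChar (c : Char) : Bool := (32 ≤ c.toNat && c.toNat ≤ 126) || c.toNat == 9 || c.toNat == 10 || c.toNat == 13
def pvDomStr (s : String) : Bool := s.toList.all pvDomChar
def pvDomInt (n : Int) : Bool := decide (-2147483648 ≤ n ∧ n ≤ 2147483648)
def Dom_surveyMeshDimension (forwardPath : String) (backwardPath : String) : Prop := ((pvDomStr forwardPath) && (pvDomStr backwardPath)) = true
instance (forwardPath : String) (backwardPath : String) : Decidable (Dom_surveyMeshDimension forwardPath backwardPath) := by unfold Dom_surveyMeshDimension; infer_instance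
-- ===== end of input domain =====

-- B replaces A's simulation loop (rotating (di,dj) vector + online min/max) by a staged
-- pipeline: net-rotation counter + direction table emitting unit steps, then prefix sums,
-- then min/max aggregation. Same return values, proved below.

-- ===== PORT A =====
-- twoWayPath = forwardPath[1:-1] + 'RR' + backwardPath[1:-1] (the same source expression in both Pythons)
def pvTwoWay (f b : List Char) : List Char :=
  PySem.List.slice f (some 1) (some (-1)) ++ ['R', 'R'] ++ PySem.List.slice b (some 1) (some (-1))

-- A's loop: state (i, j, di, dj, left, right, bottom)
def pvLoopA : List Char → Int → Int → Int → Int → Int → Int → Int → Int × Int × Int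
  | [], _i, j, _di, _dj, left, right, bottom => (bottom + 1, right - left + 1, j - left)
  | c :: cs, i, j, di, dj, left, right, bottom =>
    if c = 'W' then
      pvLoopA cs (i + di) (j + dj) di dj (min left (j + dj)) (max right (j + dj)) (max bottom (i + di))
    else if c = 'L' then pvLoopA cs i j (-dj) di left right bottom
    else if c = 'R' then pvLoopA cs i j dj (-di) left right bottom
    else pvLoopA cs i j di dj left right bottom

def surveyMeshDimension (forwardPath : String) (backwardPath : String) : Int × Int × Int :=
  pvLoopA (pvTwoWay forwardPath.toList backwardPath.toList) 0 0 1 0 0 0 0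

-- ===== PORT B =====
def pvDirs : List (Int × Int) := [(1, 0), (0, 1), (-1, 0), (0, -1)]

-- phase 1: net rotation counter r; emit _DIRS[r % 4] on each 'W'
def pvSteps : List Char → Int → List (Int × Int)
  | [], _ => []
  | c :: cs, r =>
    if c = 'L' then pvSteps cs (r + 1)
    else if c = 'R' then pvSteps cs (r - 1)
    else if c = 'W' then
      PySem.List.pyGetD pvDirs (PySem.Int.mod r 4) ((0 : Int), (0 : Int)) :: pvSteps cs r
    else pvSteps cs r

-- phase 2: prefix sums, out = [0]; out.append(out[-1] + x)
def pvPrefixLoop : List Int → List Int → List Int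
  | [], out => out
  | x :: xs, out => pvPrefixLoop xs (out ++ [PySem.List.pyGetD out (-1) 0 + x])

def pvPrefixSums (xs : List Int) : List Int := pvPrefixLoop xs [0]

-- Python max/min of a nonempty list
def pvMax : List Int → Int
  | [] => 0
  | h :: t => t.foldl max h

def pvMin : List Int → Int
  | [] => 0
  | h :: t => t.foldl min h

def surveyMeshDimension_alt (forwardPath : String) (backwardPath : String) : Int × Int × Int :=
  let steps := pvSteps (pvTwoWay forwardPath.toList backwardPath.toList) 0
  let rows := pvPrefixSums (steps.map Prod.fst)
  let cols := pvPrefixSums (steps.map Prod.snd)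
  let left := pvMin cols
  (pvMax rows + 1, pvMax cols - left + 1, PySem.List.pyGetD cols (-1) 0 - left)

-- ===== PRECONDITION & SPEC =====
def Spec_surveyMeshDimension (forwardPath : String) (backwardPath : String) (out : Int × Int × Int) : Prop := out = surveyMeshDimension_alt forwardPath backwardPath
instance (forwardPath : String) (backwardPath : String) (out : Int × Int × Int) : Decidable (Spec_surveyMeshDimension forwardPath backwardPath out) := by unfold Spec_surveyMeshDimension; infer_instance

-- ===== CLAIM =====
def Claim_equal_surveyMeshDimension : Prop := ∀ (forwardPath : String) (backwardPath : String), Dom_surveyMeshDimension forwardPath backwardPath → Spec_surveyMeshDimension forwardPath backwardPath (surveyMeshDimension forwardPath backwardPath)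

-- ===== LEMMAS AND PROOFS =====

-- direction at net rotation r
def pvDirAt (r : Int) : Int × Int :=
  PySem.List.pyGetD pvDirs (PySem.Int.mod r 4) ((0 : Int), (0 : Int))

theorem pvDirAt_eq (r : Int) :
    pvDirAt r = if r % 4 = 0 then ((1:Int),(0:Int)) else if r % 4 = 1 then (0,1)
      else if r % 4 = 2 then (-1,0) else (0,-1) := by
  unfold pvDirAt
  rw [PySem.Int.mod_eq_emod_of_pos (by norm_num)]
  have h : r % 4 = 0 ∨ r % 4 = 1 ∨ r % 4 = 2 ∨ r % 4 = 3 := by omega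
  rcases h with h | h | h | h <;> rw [h] <;> decide

theorem pvDirAt_succ (r : Int) : pvDirAt (r + 1) = (-(pvDirAt r).2, (pvDirAt r).1) := by
  rw [pvDirAt_eq, pvDirAt_eq]
  have h : r % 4 = 0 ∨ r % 4 = 1 ∨ r % 4 = 2 ∨ r % 4 = 3 := by omega
  rcases h with h | h | h | h <;>
    · have h' : (r + 1) % 4 = (r % 4 + 1) % 4 := by omega
      rw [h', h]; norm_num

theorem pvDirAt_pred (r : Int) : pvDirAt (r - 1) = ((pvDirAt r).2, -(pvDirAt r).1) := by
  rw [pvDirAt_eq, pvDirAt_eq]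
  have h : r % 4 = 0 ∨ r % 4 = 1 ∨ r % 4 = 2 ∨ r % 4 = 3 := by omega
  rcases h with h | h | h | h <;>
    · have h' : (r - 1) % 4 = (r % 4 + 3) % 4 := by omega
      rw [h', h]; norm_num

-- running sums of a step list, starting strictly after a
def pvSumsFrom (a : Int) : List Int → List Int
  | [] => []
  | x :: xs => (a + x) :: pvSumsFrom (a + x) xs

@[simp] theorem pvSumsFrom_nil (a : Int) : pvSumsFrom a [] = [] := rfl
@[simp] theorem pvSumsFrom_cons (a x : Int) (xs : List Int) :
    pvSumsFrom a (x :: xs) = (a + x) :: pvSumsFrom (a + x) xs := rfl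

theorem lastD_cons (l : List Int) (a d : Int) :
    (a :: l).getLast?.getD d = l.getLast?.getD a := by
  cases l with
  | nil => simp
  | cons b t =>
    rw [List.getLast?_cons_cons]
    obtain ⟨x, hx⟩ := Option.isSome_iff_exists.mp (by simp : (b :: t).getLast?.isSome)
    rw [hx]; simp

theorem pvPrefixLoop_char (xs : List Int) : ∀ (out : List Int) (a : Int),
    pvPrefixLoop xs (out ++ [a]) = out ++ a :: pvSumsFrom a xs := by
  induction xs with
  | nil => intro out a; simp [pvPrefixLoop]
  | cons x xs ih =>
    intro out a
    have := ih (out ++ [a]) (a + x)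
    simpa [pvPrefixLoop, PySem.List.pyGetD_neg_one_append_singleton] using this

theorem pvPrefixSums_eq (xs : List Int) : pvPrefixSums xs = 0 :: pvSumsFrom 0 xs := by
  have := pvPrefixLoop_char xs [] 0
  simpa [pvPrefixSums] using this

-- main invariant: A's loop state vs B's staged pipeline
theorem pvMain (cs : List Char) : ∀ (r i j left right bottom : Int),
    pvLoopA cs i j (pvDirAt r).1 (pvDirAt r).2 left right bottom =
      ( (pvSumsFrom i ((pvSteps cs r).map Prod.fst)).foldl max bottom + 1,
        (pvSumsFrom j ((pvSteps cs r).map Prod.snd)).foldl max right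
          - (pvSumsFrom j ((pvSteps cs r).map Prod.snd)).foldl min left + 1,
        (pvSumsFrom j ((pvSteps cs r).map Prod.snd)).getLast?.getD j
          - (pvSumsFrom j ((pvSteps cs r).map Prod.snd)).foldl min left ) := by
  induction cs with
  | nil => intro r i j left right bottom; simp [pvLoopA, pvSteps]
  | cons c cs ih =>
    intro r i j left right bottom
    by_cases hW : c = 'W'
    · have hd : PySem.List.pyGetD pvDirs (r % 4) ((0:Int),(0:Int)) = pvDirAt r := by
        unfold pvDirAt; rw [PySem.Int.mod_eq_emod_of_pos (by norm_num)]
      have h2 := ih r (i + (pvDirAt r).1) (j + (pvDirAt r).2)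
        (min left (j + (pvDirAt r).2)) (max right (j + (pvDirAt r).2))
        (max bottom (i + (pvDirAt r).1))
      subst hW
      simpa [pvLoopA, pvSteps, hd, lastD_cons] using h2
    · by_cases hL : c = 'L'
      · have := ih (r + 1) i j left right bottom
        rw [pvDirAt_succ] at this
        simpa [pvLoopA, pvSteps, hW, hL] using this
      · by_cases hR : c = 'R'
        · have := ih (r - 1) i j left right bottom
          rw [pvDirAt_pred] at this
          simpa [pvLoopA, pvSteps, hW, hL, hR] using this
        · simpa [pvLoopA, pvSteps, hW, hL, hR] using ih r i j left right bottom

theorem pyGetD_neg_one_cons (l : List Int) (a : Int) :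
    PySem.List.pyGetD (a :: l) (-1) 0 = l.getLast?.getD a := by
  rw [PySem.List.pyGetD_neg_one (a :: l) 0 (by simp)]
  rw [← lastD_cons l a 0]
  cases h : (a :: l).getLast? with
  | none => simp [List.getLast?_eq_none_iff] at h
  | some x => simp [List.getLast_eq_iff_getLast?_eq_some, h]

-- ===== VERDICT =====
theorem surveyMeshDimension_spec : Claim_equal_surveyMeshDimension := by
  intro f b _
  unfold Spec_surveyMeshDimension surveyMeshDimension surveyMeshDimension_alt
  have h := pvMain (pvTwoWay f.toList b.toList) 0 0 0 0 0 0
  have hd : pvDirAt 0 = ((1:Int),(0:Int)) := by rw [pvDirAt_eq]; norm_num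
  rw [hd] at h
  simp only [pvPrefixSums_eq, pvMax, pvMin, pyGetD_neg_one_cons]
  exact h
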